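-- pv_equiv track=rewrite | github.com/PowerOfPraxis/PraxisLibrary | Python Scipts/simplify_discover_menu.py | rename_quick_link
-- ===== SOURCE A (Python) =====
-- def rename_quick_link(lines):
--     """Rename >Discover</a> to >Prompt Engineering</a> inside mega-menu-quick-links."""
--     renamed = 0
--     in_quick_links = False
--     result = []
--     for line in lines:
--         if 'mega-menu-quick-links' in line:
--             in_quick_links = True
--         if in_quick_links and '>Discover</a>' in line:
--             line = line.replace('>Discover</a>', '>Prompt Engineering</a>')
--             renamed += 1
--             in_quick_links = False  # Only rename the first occurrence
--         # Reset if we exit the quick-links div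
--         if in_quick_links and '</div>' in line and 'mega-menu-quick-links' not in line:
--             in_quick_links = False
--         result.append(line)
--     return result, renamed
-- ===== SOURCE B (Python) =====
-- def rename_quick_link(lines):
--     """Rename >Discover</a> to >Prompt Engineering</a> inside mega-menu-quick-links.
--
--     Two-phase decomposition: first a scan that only records the indices of the
--     lines to rename, then a rebuild pass that replaces exactly those lines."""
--     targets = []
--     in_quick_links = False
--     for i, line in enumerate(lines):
--         if 'mega-menu-quick-links' in line:
--             in_quick_links = True
--         if in_quick_links and '>Discover</a>' in line:
--             targets.append(i)
--             in_quick_links = False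
--         elif in_quick_links and '</div>' in line and 'mega-menu-quick-links' not in line:
--             in_quick_links = False
--     result = [line.replace('>Discover</a>', '>Prompt Engineering</a>') if i in targets else line
--               for i, line in enumerate(lines)]
--     return result, len(targets)
-- ===== Notes on version B (the rewrite author's own statement) =====
-- stated objective: alternative
-- what changed: B separates locating from editing: a first pass records the indices of the lines to rename (same scan state machine), then a second pass rebuilds the list replacing exactly those indices, instead of A's single pass that mutates lines while appending them.
import Mathlib
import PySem

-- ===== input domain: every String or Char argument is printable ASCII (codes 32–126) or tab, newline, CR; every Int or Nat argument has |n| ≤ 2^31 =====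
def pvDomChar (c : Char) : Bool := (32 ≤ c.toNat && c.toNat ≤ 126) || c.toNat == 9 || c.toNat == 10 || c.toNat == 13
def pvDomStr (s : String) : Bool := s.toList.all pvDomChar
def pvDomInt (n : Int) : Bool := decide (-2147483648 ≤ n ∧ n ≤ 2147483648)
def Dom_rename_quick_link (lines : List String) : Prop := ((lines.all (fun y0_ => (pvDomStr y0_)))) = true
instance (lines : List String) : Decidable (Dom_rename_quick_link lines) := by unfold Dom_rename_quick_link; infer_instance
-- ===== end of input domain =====

-- B separates locating the lines to rename (an index scan) from rebuilding the output (a map), instead of mutating while building; objective: alternative decomposition.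

-- ===== PORT A =====
-- state: (renamed, in_quick_links, result)
def renameStepA (st : Int × Bool × List String) (line0 : String) : Int × Bool × List String :=
  let renamed := st.1
  let inQL := st.2.1
  let result := st.2.2
  let inQL := if PySem.Str.isIn "mega-menu-quick-links" line0 then true else inQL
  let (line, renamed, inQL) :=
    if inQL && PySem.Str.isIn ">Discover</a>" line0 then
      (PySem.Str.replace line0 ">Discover</a>" ">Prompt Engineering</a>", renamed + 1, false)
    else (line0, renamed, inQL)
  let inQL := if inQL && PySem.Str.isIn "</div>" line && !(PySem.Str.isIn "mega-menu-quick-links" line) then false else inQL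
  (renamed, inQL, result ++ [line])

def rename_quick_link (lines : List String) : List String × Int :=
  let st := lines.foldl renameStepA (0, false, [])
  (st.2.2, st.1)

-- ===== PORT B =====
-- pass 1: record the indices of the lines to rename; state: (targets, in_quick_links)
def renameStepB (st : List Int × Bool) (p : Int × String) : List Int × Bool :=
  let targets := st.1
  let inQL := if PySem.Str.isIn "mega-menu-quick-links" p.2 then true else st.2
  if inQL && PySem.Str.isIn ">Discover</a>" p.2 then
    (targets ++ [p.1], false)
  else if inQL && PySem.Str.isIn "</div>" p.2 && !(PySem.Str.isIn "mega-menu-quick-links" p.2) then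
    (targets, false)
  else
    (targets, inQL)

def rename_quick_link_alt (lines : List String) : List String × Int :=
  let targets := ((PySem.List.enumerate lines).foldl renameStepB ([], false)).1
  -- pass 2: rebuild, replacing only the located lines
  (((PySem.List.enumerate lines).map (fun p =>
      if targets.contains p.1 then PySem.Str.replace p.2 ">Discover</a>" ">Prompt Engineering</a>" else p.2)),
   (targets.length : Int))

-- ===== PRECONDITION & SPEC =====
def Spec_rename_quick_link (lines : List String) (out : List String × Int) : Prop := out = rename_quick_link_alt lines
instance (lines : List String) (out : List String × Int) : Decidable (Spec_rename_quick_link lines out) := by unfold Spec_rename_quick_link; infer_instance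

-- ===== CLAIM (what is proved, stated in full; the proofs are below) =====
def Claim_equal_rename_quick_link : Prop := ∀ (lines : List String), Dom_rename_quick_link lines → Spec_rename_quick_link lines (rename_quick_link lines)

-- ===== LEMMAS AND PROOFS =====

-- reference recursion: given the starting flag and index, (output lines, fired indices)
def specGo (q : Bool) (s : Int) : List String → List String × List Int
  | [] => ([], [])
  | l :: ls =>
    let q1 := PySem.Str.isIn "mega-menu-quick-links" l || q
    if q1 && PySem.Str.isIn ">Discover</a>" l then
      let r := specGo false (s + 1) ls
      (PySem.Str.replace l ">Discover</a>" ">Prompt Engineering</a>" :: r.1, s :: r.2)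
    else
      let q' := if q1 && PySem.Str.isIn "</div>" l && !(PySem.Str.isIn "mega-menu-quick-links" l) then false else q1
      let r := specGo q' (s + 1) ls
      (l :: r.1, r.2)

theorem stepA_fire (r : Int) (q : Bool) (acc : List String) (l : String)
    (h : ((PySem.Str.isIn "mega-menu-quick-links" l || q) && PySem.Str.isIn ">Discover</a>" l) = true) :
    renameStepA (r, q, acc) l
      = (r + 1, false, acc ++ [PySem.Str.replace l ">Discover</a>" ">Prompt Engineering</a>"]) := by
  cases hm : PySem.Str.isIn "mega-menu-quick-links" l <;> cases hq : q <;>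
    cases hv : PySem.Str.isIn "</div>" l <;> simp_all [renameStepA]

theorem stepA_nofire (r : Int) (q : Bool) (acc : List String) (l : String)
    (h : ((PySem.Str.isIn "mega-menu-quick-links" l || q) && PySem.Str.isIn ">Discover</a>" l) = false) :
    renameStepA (r, q, acc) l
      = (r, (if ((PySem.Str.isIn "mega-menu-quick-links" l || q) && PySem.Str.isIn "</div>" l
              && !(PySem.Str.isIn "mega-menu-quick-links" l)) = true then false
             else (PySem.Str.isIn "mega-menu-quick-links" l || q)), acc ++ [l]) := by
  cases hm : PySem.Str.isIn "mega-menu-quick-links" l <;> cases hq : q <;>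
    cases hv : PySem.Str.isIn "</div>" l <;> simp_all [renameStepA]

theorem stepB_fire (tacc : List Int) (q : Bool) (i : Int) (l : String)
    (h : ((PySem.Str.isIn "mega-menu-quick-links" l || q) && PySem.Str.isIn ">Discover</a>" l) = true) :
    renameStepB (tacc, q) (i, l) = (tacc ++ [i], false) := by
  cases hm : PySem.Str.isIn "mega-menu-quick-links" l <;> cases hq : q <;>
    cases hv : PySem.Str.isIn "</div>" l <;> simp_all [renameStepB]

theorem stepB_nofire (tacc : List Int) (q : Bool) (i : Int) (l : String)
    (h : ((PySem.Str.isIn "mega-menu-quick-links" l || q) && PySem.Str.isIn ">Discover</a>" l) = false) :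
    renameStepB (tacc, q) (i, l)
      = (tacc, (if ((PySem.Str.isIn "mega-menu-quick-links" l || q) && PySem.Str.isIn "</div>" l
              && !(PySem.Str.isIn "mega-menu-quick-links" l)) = true then false
             else (PySem.Str.isIn "mega-menu-quick-links" l || q))) := by
  cases hm : PySem.Str.isIn "mega-menu-quick-links" l <;> cases hq : q <;>
    cases hv : PySem.Str.isIn "</div>" l <;> simp_all [renameStepB]

theorem specGo_mem (ls : List String) (q : Bool) (s i : Int)
    (h : i ∈ (specGo q s ls).2) : s ≤ i ∧ i < s + ls.length := by
  induction ls generalizing q s with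
  | nil => simp [specGo] at h
  | cons l ls ih =>
    simp only [specGo] at h
    split at h
    · rcases List.mem_cons.1 h with rfl | h
      · constructor
        · omega
        · simp only [List.length_cons]; push_cast; omega
      · have := ih false (s + 1) h
        simp only [List.length_cons]; push_cast; omega
    · have := ih _ (s + 1) h
      simp only [List.length_cons]; push_cast; omega

theorem foldlA_eq (ls : List String) (q : Bool) (r : Int) (acc : List String) (s : Int) :
    ∃ qf, ls.foldl renameStepA (r, q, acc)
      = (r + ((specGo q s ls).2.length : Int), qf, acc ++ (specGo q s ls).1) := by
  induction ls generalizing q r acc s with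
  | nil => exact ⟨q, by simp [specGo]⟩
  | cons l ls ih =>
    simp only [List.foldl_cons, specGo]
    by_cases hd : ((PySem.Str.isIn "mega-menu-quick-links" l || q)
        && PySem.Str.isIn ">Discover</a>" l) = true
    · obtain ⟨qf, hqf⟩ := ih false (r + 1)
        (acc ++ [PySem.Str.replace l ">Discover</a>" ">Prompt Engineering</a>"]) (s + 1)
      refine ⟨qf, ?_⟩
      rw [stepA_fire _ _ _ _ hd, hqf, if_pos hd]
      have hlen : r + 1 + ((specGo false (s + 1) ls).2.length : Int)
          = r + ((s :: (specGo false (s + 1) ls).2).length : Int) := by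
        simp only [List.length_cons]; push_cast; ring
      rw [← hlen]
      simp
    · rw [Bool.not_eq_true] at hd
      have hd' : ¬ (((PySem.Str.isIn "mega-menu-quick-links" l || q)
          && PySem.Str.isIn ">Discover</a>" l) = true) := by rw [hd]; exact Bool.false_ne_true
      obtain ⟨qf, hqf⟩ := ih _ r (acc ++ [l]) (s + 1)
      refine ⟨qf, ?_⟩
      rw [stepA_nofire _ _ _ _ hd, hqf, if_neg hd']
      simp [List.append_assoc]
  
theorem foldlB_eq (ls : List String) (q : Bool) (tacc : List Int) (s : Int) :
    ∃ qf, (PySem.List.enumerate ls s).foldl renameStepB (tacc, q)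
      = (tacc ++ (specGo q s ls).2, qf) := by
  induction ls generalizing q tacc s with
  | nil => exact ⟨q, by simp [PySem.List.enumerate_nil, specGo]⟩
  | cons l ls ih =>
    rw [PySem.List.enumerate_cons]
    simp only [List.foldl_cons, specGo]
    by_cases hd : ((PySem.Str.isIn "mega-menu-quick-links" l || q)
        && PySem.Str.isIn ">Discover</a>" l) = true
    · obtain ⟨qf, hqf⟩ := ih false (tacc ++ [s]) (s + 1)
      refine ⟨qf, ?_⟩
      rw [stepB_fire _ _ _ _ hd, hqf, if_pos hd]
      simp
    · rw [Bool.not_eq_true] at hd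
      have hd' : ¬ (((PySem.Str.isIn "mega-menu-quick-links" l || q)
          && PySem.Str.isIn ">Discover</a>" l) = true) := by rw [hd]; exact Bool.false_ne_true
      obtain ⟨qf, hqf⟩ := ih _ tacc (s + 1)
      refine ⟨qf, ?_⟩
      rw [stepB_nofire _ _ _ _ hd, hqf, if_neg hd']

theorem mapB_eq (ls : List String) (q : Bool) (s : Int) (targets : List Int)
    (h : ∀ i, s ≤ i → i < s + ls.length → targets.contains i = (specGo q s ls).2.contains i) :
    (PySem.List.enumerate ls s).map (fun p =>
        if targets.contains p.1 then PySem.Str.replace p.2 ">Discover</a>" ">Prompt Engineering</a>" else p.2)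
      = (specGo q s ls).1 := by
  induction ls generalizing q s with
  | nil => simp [PySem.List.enumerate_nil, specGo]
  | cons l ls ih =>
    rw [PySem.List.enumerate_cons, List.map_cons]
    simp only [specGo]
    by_cases hd : ((PySem.Str.isIn "mega-menu-quick-links" l || q)
        && PySem.Str.isIn ">Discover</a>" l) = true
    · simp only [if_pos hd]
      have hs : targets.contains s = true := by
        rw [h s le_rfl (by simp only [List.length_cons]; push_cast; omega)]
        simp only [specGo]
        rw [if_pos hd]
        simp
      rw [hs]
      simp only [if_true]
      congr 1
      apply ih false (s + 1)
      intro i hi1 hi2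
      have hne : i ≠ s := by omega
      have hlen : i < s + ((l :: ls).length : Int) := by
        simp only [List.length_cons]; push_cast at hi2 ⊢; omega
      rw [h i (by omega) hlen]
      simp only [specGo]
      rw [if_pos hd]
      simp [hne]
    · simp only [if_neg hd]
      have hs : targets.contains s = false := by
        rw [h s le_rfl (by simp only [List.length_cons]; push_cast; omega)]
        simp only [specGo]
        rw [if_neg hd]
        by_contra hc
        simp only [Bool.not_eq_false, List.contains_eq_mem, decide_eq_true_eq] at hc
        have := specGo_mem ls _ (s + 1) s hc
        omega
      rw [hs]
      simp only [if_false, Bool.false_eq_true]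
      congr 1
      apply ih _ (s + 1)
      intro i hi1 hi2
      have hlen : i < s + ((l :: ls).length : Int) := by
        simp only [List.length_cons]; push_cast at hi2 ⊢; omega
      rw [h i (by omega) hlen]
      simp only [specGo]
      rw [if_neg hd]

-- ===== VERDICT (by name: the statement is the Claim_ definition above) =====
theorem rename_quick_link_spec : Claim_equal_rename_quick_link := by
  intro lines _
  unfold Spec_rename_quick_link rename_quick_link rename_quick_link_alt
  obtain ⟨qfA, hA⟩ := foldlA_eq lines false 0 [] 0
  obtain ⟨qfB, hB⟩ := foldlB_eq lines false [] 0
  rw [hA, hB]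
  simp only [List.nil_append, zero_add]
  have hm := mapB_eq lines false 0 ((specGo false 0 lines).2) (fun i _ _ => rfl)
  simp only [Prod.mk.injEq]
  exact ⟨hm.symm, trivial⟩
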